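-- pv_equiv track=rewrite | github.com/PresidentofMexico/CLO-Indenture-Validator | src/compliance_engine.py | _parse_covenant_response
-- ===== SOURCE A (Python) =====
-- from typing import Dict, List, Optional, Tuple
--
-- def _parse_covenant_response(response: str) -> List[Dict[str, str]]:
--     """
--     Parse covenant extraction response.
--
--     Args:
--         response: LLM response with covenant information
--
--     Returns:
--         List of covenant dictionaries
--     """
--     covenants = []
--
--     # Simple parsing logic (in production, use more sophisticated parsing)
--     current_covenant = {}
--     for line in response.split('\n'):
--         line = line.strip()
--         if line.startswith('- Covenant Name:'):
--             if current_covenant: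
--                 covenants.append(current_covenant)
--             current_covenant = {'name': line.split(':', 1)[1].strip()}
--         elif line.startswith('Threshold:') and current_covenant:
--             current_covenant['threshold'] = line.split(':', 1)[1].strip()
--         elif line.startswith('Condition:') and current_covenant:
--             current_covenant['condition'] = line.split(':', 1)[1].strip()
--
--     if current_covenant:
--         covenants.append(current_covenant)
--
--     return covenants
-- ===== SOURCE B (Python) =====
-- def _parse_covenant_response(response):
--     lines = [ln.strip() for ln in response.split('\n')]
--     # pass 1: partition lines into groups, one per '- Covenant Name:' line;
--     # lines before the first name line are dropped
--     groups = []
--     for ln in lines: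
--         if ln.startswith('- Covenant Name:'):
--             groups.append([ln])
--         elif groups:
--             groups[-1].append(ln)
--     # pass 2: map each group to its covenant dict
--     result = []
--     for group in groups:
--         d = {'name': group[0].split(':', 1)[1].strip()}
--         for ln in group[1:]:
--             if ln.startswith('Threshold:'):
--                 d['threshold'] = ln.split(':', 1)[1].strip()
--             elif ln.startswith('Condition:'):
--                 d['condition'] = ln.split(':', 1)[1].strip()
--         result.append(d)
--     return result
-- ===== Notes on version B (the rewrite author's own statement) =====
-- stated objective: alternative
-- what changed: Replaces A's single interleaved loop that mutates a current-covenant dict with a two-pass decomposition: first partition the stripped lines into groups at each '- Covenant Name:' line (dropping lines before the first), then map each group to its dict in a separate pass.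
import Mathlib
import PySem

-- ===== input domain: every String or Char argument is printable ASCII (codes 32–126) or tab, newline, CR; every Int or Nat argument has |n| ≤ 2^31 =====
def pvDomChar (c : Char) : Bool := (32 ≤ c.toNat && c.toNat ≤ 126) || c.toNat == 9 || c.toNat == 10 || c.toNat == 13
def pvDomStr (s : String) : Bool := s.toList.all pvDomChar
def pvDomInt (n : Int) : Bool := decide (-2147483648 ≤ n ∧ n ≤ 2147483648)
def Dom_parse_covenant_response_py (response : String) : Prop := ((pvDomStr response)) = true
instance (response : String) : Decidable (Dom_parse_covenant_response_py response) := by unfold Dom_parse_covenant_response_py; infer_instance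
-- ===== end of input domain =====

-- B replaces A's single interleaved loop by a two-pass decomposition (partition the
-- stripped lines into groups at name lines, then map each group to its dict); same values.

-- line.split(':', 1)[1].strip(); exact for the lines it is applied to, which start with
-- a prefix containing ':', so split(':', 1) always has a second part (getD never defaults).
def pvVal (line : List Char) : String :=
  String.ofList (PySem.Chars.strip ((PySem.Chars.splitOnMax line [':'] 1).getD 1 []))

-- ===== PORT A =====
-- the body of A's for-loop (state: covenants so far, current_covenant)
def pvAStep (st : List (PySem.Dict String String) × PySem.Dict String String)
    (line0 : List Char) : List (PySem.Dict String String) × PySem.Dict String String :=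
  let line := PySem.Chars.strip line0
  if PySem.Chars.startswith line "- Covenant Name:".toList then
    (if st.2.items.isEmpty then st.1 else st.1 ++ [st.2],
     (PySem.Dict.empty : PySem.Dict String String).insert "name" (pvVal line))
  else if PySem.Chars.startswith line "Threshold:".toList && !st.2.items.isEmpty then
    (st.1, st.2.insert "threshold" (pvVal line))
  else if PySem.Chars.startswith line "Condition:".toList && !st.2.items.isEmpty then
    (st.1, st.2.insert "condition" (pvVal line))
  else st

-- the final flush ('if current_covenant: covenants.append(...)') and return
def pvAFinish (st : List (PySem.Dict String String) × PySem.Dict String String) :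
    List (List (String × String)) :=
  (if st.2.items.isEmpty then st.1 else st.1 ++ [st.2]).map (·.items)

def parse_covenant_response_py (response : String) : List (List (String × String)) :=
  pvAFinish ((PySem.Chars.splitOn response.toList ['\n']).foldl pvAStep ([], PySem.Dict.empty))

-- ===== PORT B =====
-- pass 1 loop body: open a new group at a name line, else append to the last group
def pvGroupStep (gs : List (List (List Char))) (ln : List Char) : List (List (List Char)) :=
  if PySem.Chars.startswith ln "- Covenant Name:".toList then gs ++ [[ln]]
  else if gs.isEmpty then gs
  else gs.dropLast ++ [gs.getLastD [] ++ [ln]]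

-- pass 2 inner loop body: set threshold/condition from a matching line
def pvFieldStep (d : PySem.Dict String String) (ln : List Char) : PySem.Dict String String :=
  if PySem.Chars.startswith ln "Threshold:".toList then d.insert "threshold" (pvVal ln)
  else if PySem.Chars.startswith ln "Condition:".toList then d.insert "condition" (pvVal ln)
  else d

-- pass 2: one group to its covenant dict
def pvDictOf (g : List (List Char)) : PySem.Dict String String :=
  match g with
  | [] => PySem.Dict.empty
  | head :: rest =>
      rest.foldl pvFieldStep ((PySem.Dict.empty : PySem.Dict String String).insert "name" (pvVal head))

def parse_covenant_response_py_alt (response : String) : List (List (String × String)) :=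
  ((((PySem.Chars.splitOn response.toList ['\n']).map PySem.Chars.strip).foldl pvGroupStep []).map
    (fun g => (pvDictOf g).items))

-- ===== PRECONDITION & SPEC =====
def Spec_parse_covenant_response_py (response : String) (out : List (List (String × String))) : Prop := out = parse_covenant_response_py_alt response
instance (response : String) (out : List (List (String × String))) : Decidable (Spec_parse_covenant_response_py response out) := by unfold Spec_parse_covenant_response_py; infer_instance

-- ===== CLAIM (what is proved, stated in full; the proofs are below) =====
def Claim_equal_parse_covenant_response_py : Prop := ∀ (response : String), Dom_parse_covenant_response_py response → Spec_parse_covenant_response_py response (parse_covenant_response_py response)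

-- ===== LEMMAS AND PROOFS =====

-- the invariant tying A's fold state to B's group list
def pvRel (gs : List (List (List Char)))
    (st : List (PySem.Dict String String) × PySem.Dict String String) : Prop :=
  if gs = [] then st = ([], PySem.Dict.empty)
  else st.1 = gs.dropLast.map pvDictOf ∧ st.2 = pvDictOf (gs.getLastD []) ∧ st.2.items ≠ []

lemma pv_insert_items_ne_nil (d : PySem.Dict String String) (k : String) (v : String) :
    (d.insert k v).items ≠ [] := by
  cases d with
  | mk its =>
    rw [PySem.Dict.items_insert]
    split_ifs with h
    · intro hc
      rw [List.map_eq_nil_iff] at hc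
      rw [show (PySem.Dict.mk its).items = its from rfl] at hc
      subst hc
      simp [PySem.Dict.contains_mk] at h
    · simp

lemma pv_fieldStep_items_ne_nil (d : PySem.Dict String String) (ln : List Char)
    (h : d.items ≠ []) : (pvFieldStep d ln).items ≠ [] := by
  unfold pvFieldStep
  split_ifs <;> first | exact pv_insert_items_ne_nil _ _ _ | exact h

lemma pvDictOf_append (g : List (List Char)) (ln : List Char) (h : g ≠ []) :
    pvDictOf (g ++ [ln]) = pvFieldStep (pvDictOf g) ln := by
  cases g with
  | nil => exact absurd rfl h
  | cons a as => simp [pvDictOf, List.foldl_append]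

lemma pv_dropLast_append_getLastD (g : List (List (List Char))) (h : g ≠ []) :
    g.dropLast ++ [g.getLastD []] = g := by
  induction g with
  | nil => exact absurd rfl h
  | cons a as ih =>
    cases as with
    | nil => rfl
    | cons b bs => simpa using ih (by simp)

lemma pvStep_rel (gs : List (List (List Char)))
    (st : List (PySem.Dict String String) × PySem.Dict String String)
    (ln : List Char) (h : pvRel gs st) :
    pvRel (pvGroupStep gs (PySem.Chars.strip ln)) (pvAStep st ln) := by
  unfold pvGroupStep pvAStep
  by_cases hn : PySem.Chars.startswith (PySem.Chars.strip ln) "- Covenant Name:".toList = true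
  · -- a name line: B opens a new group, A flushes the current dict
    simp only [hn, if_true]
    unfold pvRel
    rw [if_neg (by simp)]
    by_cases hgs : gs = []
    · subst hgs
      unfold pvRel at h
      rw [if_pos rfl] at h
      subst h
      refine ⟨by simp [PySem.Dict.empty], by simp [pvDictOf], pv_insert_items_ne_nil _ _ _⟩
    · unfold pvRel at h
      rw [if_neg hgs] at h
      obtain ⟨h1, h2, h3⟩ := h
      have hisE : ¬ (st.2.items.isEmpty = true) := fun hh => h3 (List.isEmpty_iff.mp hh)
      refine ⟨?_, ?_, pv_insert_items_ne_nil _ _ _⟩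
      · rw [if_neg hisE, List.dropLast_concat, h1, h2,
          show [pvDictOf (gs.getLastD [])] = List.map pvDictOf [gs.getLastD []] from rfl,
          ← List.map_append, pv_dropLast_append_getLastD gs hgs]
      · rw [List.getLastD_concat]
        simp [pvDictOf]
  · -- not a name line
    simp only [hn, if_false, Bool.false_eq_true]
    by_cases hgs : gs = []
    · subst hgs
      unfold pvRel at h
      rw [if_pos rfl] at h
      subst h
      simp only [List.isEmpty_nil, if_true]
      have he : (PySem.Dict.empty : PySem.Dict String String).items = [] := rfl
      unfold pvRel
      rw [if_pos rfl]
      simp [he]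
    · unfold pvRel at h
      rw [if_neg hgs] at h
      obtain ⟨h1, h2, h3⟩ := h
      have hisE : st.2.items.isEmpty = false := by
        cases hx : st.2.items with
        | nil => exact absurd hx h3
        | cons _ _ => simp
      have hgl : gs.getLastD [] ≠ [] := by
        intro hg0
        apply h3
        rw [h2, hg0]
        rfl
      have hA : (if PySem.Chars.startswith (PySem.Chars.strip ln) "Threshold:".toList && !st.2.items.isEmpty then
            (st.1, st.2.insert "threshold" (pvVal (PySem.Chars.strip ln)))
          else if PySem.Chars.startswith (PySem.Chars.strip ln) "Condition:".toList && !st.2.items.isEmpty then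
            (st.1, st.2.insert "condition" (pvVal (PySem.Chars.strip ln)))
          else st)
          = (st.1, pvFieldStep st.2 (PySem.Chars.strip ln)) := by
        unfold pvFieldStep
        simp only [hisE, Bool.not_false, Bool.and_true]
        split_ifs <;> simp
      rw [hA, if_neg (by simp [List.isEmpty_iff, hgs])]
      unfold pvRel
      rw [if_neg (by simp)]
      refine ⟨?_, ?_, pv_fieldStep_items_ne_nil _ _ h3⟩
      · rw [List.dropLast_concat, h1]
      · rw [List.getLastD_concat, pvDictOf_append _ _ hgl, h2]

lemma pvFold_rel (l : List (List Char)) (gs : List (List (List Char)))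
    (st : List (PySem.Dict String String) × PySem.Dict String String)
    (h : pvRel gs st) :
    pvRel ((l.map PySem.Chars.strip).foldl pvGroupStep gs) (l.foldl pvAStep st) := by
  induction l generalizing gs st with
  | nil => exact h
  | cons a as ih => exact ih _ _ (pvStep_rel gs st a h)

lemma pvFinish_of_rel (gs : List (List (List Char)))
    (st : List (PySem.Dict String String) × PySem.Dict String String)
    (h : pvRel gs st) :
    pvAFinish st = gs.map (fun g => (pvDictOf g).items) := by
  unfold pvAFinish
  by_cases hgs : gs = []
  · subst hgs
    unfold pvRel at h
    rw [if_pos rfl] at h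
    subst h
    simp [show (PySem.Dict.empty : PySem.Dict String String).items = [] from rfl]
  · unfold pvRel at h
    rw [if_neg hgs] at h
    obtain ⟨h1, h2, h3⟩ := h
    rw [if_neg (fun hh => h3 (List.isEmpty_iff.mp hh)), h1, h2,
      show [pvDictOf (gs.getLastD [])] = List.map pvDictOf [gs.getLastD []] from rfl,
      ← List.map_append, pv_dropLast_append_getLastD gs hgs, List.map_map]
    rfl

-- ===== VERDICT (by name: the statement is the Claim_ definition above) =====
theorem parse_covenant_response_py_spec : Claim_equal_parse_covenant_response_py := by
  intro response _
  unfold Spec_parse_covenant_response_py parse_covenant_response_py parse_covenant_response_py_alt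
  exact pvFinish_of_rel _ _
    (pvFold_rel (PySem.Chars.splitOn response.toList ['\n']) [] ([], PySem.Dict.empty)
      (by unfold pvRel; rw [if_pos rfl]))
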